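-- pv_equiv track=rewrite | github.com/Makanov-Nurzhan/python_sheet | data structure/arrays.py | bestSeat
-- ===== SOURCE A (Python) =====
-- def bestSeat(seats):
--     maxEmpty = 0
--     seat = -1
--     l = 0
--
--     while l < len(seats):
--         r = l + 1
--         while r < len(seats) and seats[r] == 0:
--             r += 1
--         availSp = r - l - 1
--         if availSp > maxEmpty:
--             seat = (r + l) // 2
--             maxEmpty = availSp
--         l = r
--     return seat
-- ===== SOURCE B (Python) =====
-- def bestSeat(seats):
--     bounds = [0] + [i for i, s in enumerate(seats) if s != 0] + [len(seats)]
--     maxEmpty = 0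
--     seat = -1
--     for l, r in zip(bounds, bounds[1:]):
--         gap = r - l - 1
--         if gap > maxEmpty:
--             seat = (r + l) // 2
--             maxEmpty = gap
--     return seat
-- ===== Notes on version B (the rewrite author's own statement) =====
-- stated objective: simpler
-- what changed: Replaced A's nested while-loops that scan runs of empty seats with a single pass over the occupied-seat index list framed by the boundary sentinels 0 and len(seats), taking gaps between consecutive bounds.
import Mathlib
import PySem

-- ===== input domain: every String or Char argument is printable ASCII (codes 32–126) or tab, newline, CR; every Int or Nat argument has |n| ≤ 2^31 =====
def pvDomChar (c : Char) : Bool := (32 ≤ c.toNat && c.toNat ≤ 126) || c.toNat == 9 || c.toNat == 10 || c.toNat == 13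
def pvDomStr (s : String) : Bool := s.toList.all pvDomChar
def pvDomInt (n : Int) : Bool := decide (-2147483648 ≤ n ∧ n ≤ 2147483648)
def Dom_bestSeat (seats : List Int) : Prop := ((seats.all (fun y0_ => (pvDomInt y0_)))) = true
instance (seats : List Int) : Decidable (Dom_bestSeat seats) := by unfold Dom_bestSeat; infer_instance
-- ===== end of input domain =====

-- B replaces A's nested while-loop scan by one pass over the occupied-index list framed
-- with the boundary sentinels 0 and len(seats) (objective: simpler decomposition, same cost).

-- ===== PORT A =====
-- inner while loop: advance r while r < len(seats) and seats[r] == 0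
def bestSeatInner (seats : List Int) (r : Nat) : Nat :=
  if h : r < seats.length ∧ seats.getD r 0 = 0 then bestSeatInner seats (r + 1) else r
termination_by seats.length - r
decreasing_by omega

-- the port's outer loop needs this to terminate
theorem bestSeatInner_ge (seats : List Int) (r : Nat) : r ≤ bestSeatInner seats r := by
  fun_induction bestSeatInner with
  | case1 r h ih => omega
  | case2 r h => omega

-- outer while loop over l with state (maxEmpty, seat)
def bestSeatOuter (seats : List Int) (maxEmpty seat : Int) (l : Nat) : Int :=
  if h : l < seats.length then
    let r := bestSeatInner seats (l + 1)
    let availSp : Int := (r : Int) - (l : Int) - 1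
    if availSp > maxEmpty then
      bestSeatOuter seats availSp (PySem.Int.floordiv ((r : Int) + (l : Int)) 2) r
    else
      bestSeatOuter seats maxEmpty seat r
  else seat
termination_by seats.length - l
decreasing_by
  · have := bestSeatInner_ge seats (l + 1); omega
  · have := bestSeatInner_ge seats (l + 1); omega

def bestSeat (seats : List Int) : Int := bestSeatOuter seats 0 (-1) 0

-- ===== PORT B =====
-- the for-loop body of Source B (update of (maxEmpty, seat) at one pair (l, r))
def pvStep (st : Int × Int) (p : Int × Int) : Int × Int :=
  let gap := p.2 - p.1 - 1
  if gap > st.1 then (gap, PySem.Int.floordiv (p.2 + p.1) 2) else st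

def bestSeat_alt (seats : List Int) : Int :=
  -- bounds = [0] + [i for i, s in enumerate(seats) if s != 0] + [len(seats)]
  let bounds : List Int :=
    (0 : Int) :: (((PySem.List.enumerate seats 0).filter (fun p => p.2 != 0)).map (fun p => p.1))
      ++ [(seats.length : Int)]
  -- for l, r in zip(bounds, bounds[1:]): …   (bounds[1:] = drop 1, exact for this nonneg slice)
  ((List.zip bounds (bounds.drop 1)).foldl pvStep ((0 : Int), (-1 : Int))).2

-- ===== PRECONDITION & SPEC =====
def Spec_bestSeat (seats : List Int) (out : Int) : Prop := out = bestSeat_alt seats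
instance (seats : List Int) (out : Int) : Decidable (Spec_bestSeat seats out) := by unfold Spec_bestSeat; infer_instance

-- ===== CLAIM (what is proved, stated in full; the proofs are below) =====
def Claim_equal_bestSeat : Prop := ∀ (seats : List Int), Dom_bestSeat seats → Spec_bestSeat seats (bestSeat seats)

-- ===== LEMMAS AND PROOFS =====

theorem bestSeatInner_le (seats : List Int) (r : Nat) (h : r ≤ seats.length) :
    bestSeatInner seats r ≤ seats.length := by
  fun_induction bestSeatInner with
  | case1 r h' ih => exact ih (by omega)
  | case2 r h' => omega

theorem bestSeatInner_zeros (seats : List Int) (r : Nat) :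
    ∀ i, r ≤ i → i < bestSeatInner seats r → seats.getD i 0 = 0 := by
  fun_induction bestSeatInner with
  | case1 r h ih =>
    intro i hi hlt
    rcases Nat.eq_or_lt_of_le hi with rfl | hi'
    · exact h.2
    · exact ih i hi' hlt
  | case2 r h =>
    intro i hi hlt; omega

theorem bestSeatInner_stop (seats : List Int) (r : Nat)
    (h : bestSeatInner seats r < seats.length) :
    seats.getD (bestSeatInner seats r) 0 ≠ 0 := by
  fun_induction bestSeatInner with
  | case1 r h' ih => exact ih h
  | case2 r h' =>
    intro hz
    exact h' ⟨h, hz⟩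

-- consecutive pairs of a list (= zip(bounds, bounds[1:]))
def pvPairsOf : List Int → List (Int × Int)
  | a :: b :: t => (a, b) :: pvPairsOf (b :: t)
  | _ => []

theorem zip_drop_eq_pairsOf : ∀ l : List Int, List.zip l (l.drop 1) = pvPairsOf l := by
  intro l
  induction l with
  | nil => rfl
  | cons a t ih =>
    cases t with
    | nil => rfl
    | cons b t' =>
      simp only [List.drop_succ_cons, List.drop_zero, List.zip_cons_cons, pvPairsOf]
      simpa using ih

-- the successive values of r produced by A's outer loop, starting after position l
def pvBoundsFrom (seats : List Int) (l : Nat) : List Int :=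
  if h : l < seats.length then
    ((bestSeatInner seats (l + 1) : Nat) : Int) :: pvBoundsFrom seats (bestSeatInner seats (l + 1))
  else []
termination_by seats.length - l
decreasing_by have := bestSeatInner_ge seats (l + 1); omega

-- B's occupied-index list restricted to indices ≥ j
def pvNZ (seats : List Int) (j : Nat) : List Int :=
  ((PySem.List.enumerate (seats.drop j) (j : Int)).filter (fun p => p.2 != 0)).map (fun p => p.1)

theorem pvNZ_of_ge (seats : List Int) (j : Nat) (h : seats.length ≤ j) : pvNZ seats j = [] := by
  unfold pvNZ
  rw [List.drop_eq_nil_of_le h]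
  simp [PySem.List.enumerate]

theorem pvNZ_step (seats : List Int) (j : Nat) (h : j < seats.length) :
    pvNZ seats j =
      if seats.getD j 0 ≠ 0 then (j : Int) :: pvNZ seats (j + 1) else pvNZ seats (j + 1) := by
  unfold pvNZ
  rw [List.drop_eq_getElem_cons h, PySem.List.enumerate_cons]
  have hc : (j : Int) + 1 = ((j + 1 : Nat) : Int) := by push_cast; ring
  rw [hc]
  by_cases hz : seats[j] = 0
  · simp [hz, List.getElem?_eq_getElem h]
  · simp [hz, List.getElem?_eq_getElem h]

theorem pvNZ_skip (seats : List Int) :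
    ∀ j r : Nat, j ≤ r → (∀ i, j ≤ i → i < r → seats.getD i 0 = 0) → pvNZ seats j = pvNZ seats r := by
  intro j r
  induction r with
  | zero =>
    intro h _
    have : j = 0 := by omega
    rw [this]
  | succ r ih =>
    intro h hz
    rcases Nat.eq_or_lt_of_le h with he | hlt
    · rw [he]
    · have h1 : j ≤ r := by omega
      have e1 := ih h1 (fun i hi hir => hz i hi (by omega))
      have e2 : pvNZ seats r = pvNZ seats (r + 1) := by
        by_cases hr : r < seats.length
        · rw [pvNZ_step seats r hr, if_neg (not_not_intro (hz r h1 (by omega)))]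
        · rw [pvNZ_of_ge seats r (by omega), pvNZ_of_ge seats (r + 1) (by omega)]
      rw [e1, e2]

-- main bridge: B's framed occupied list below = A's chain of r-values
theorem pvBounds_eq (seats : List Int) :
    ∀ l : Nat, l < seats.length →
      pvNZ seats (l + 1) ++ [(seats.length : Int)] = pvBoundsFrom seats l := by
  have H : ∀ d l, seats.length - l ≤ d → l < seats.length →
      pvNZ seats (l + 1) ++ [(seats.length : Int)] = pvBoundsFrom seats l := by
    intro d
    induction d with
    | zero => intro l hd hl; omega
    | succ d ih =>
      intro l hd hl
      have hge := bestSeatInner_ge seats (l + 1)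
      have hle := bestSeatInner_le seats (l + 1) (by omega)
      have hskip := pvNZ_skip seats (l + 1) (bestSeatInner seats (l + 1)) (by omega)
        (fun i hi hir => bestSeatInner_zeros seats (l + 1) i hi hir)
      rw [hskip, pvBoundsFrom, dif_pos hl]
      rcases Nat.eq_or_lt_of_le hle with he | hlt
      · rw [pvNZ_of_ge seats _ (by omega), pvBoundsFrom, dif_neg (by omega)]
        simp [he]
      · have hnz := bestSeatInner_stop seats (l + 1) hlt
        rw [pvNZ_step seats _ hlt, if_pos hnz]
        rw [List.cons_append, ih _ (by omega) hlt]
  exact fun l hl => H (seats.length - l) l (le_refl _) hl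

theorem outer_eq_fold (seats : List Int) :
    ∀ l : Nat, ∀ m s : Int,
      bestSeatOuter seats m s l =
        (List.foldl pvStep (m, s) (pvPairsOf ((l : Int) :: pvBoundsFrom seats l))).2 := by
  have H : ∀ d l, seats.length - l ≤ d → ∀ m s : Int,
      bestSeatOuter seats m s l =
        (List.foldl pvStep (m, s) (pvPairsOf ((l : Int) :: pvBoundsFrom seats l))).2 := by
    intro d
    induction d with
    | zero =>
      intro l hd m s
      have hl : ¬ l < seats.length := by omega
      rw [bestSeatOuter, dif_neg hl, pvBoundsFrom, dif_neg hl]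
      rfl
    | succ d ih =>
      intro l hd m s
      by_cases hl : l < seats.length
      · have hge := bestSeatInner_ge seats (l + 1)
        rw [bestSeatOuter, dif_pos hl, pvBoundsFrom, dif_pos hl]
        simp only [pvPairsOf, List.foldl_cons]
        have hstep : pvStep (m, s)
            ((l : Int), ((bestSeatInner seats (l + 1) : Nat) : Int)) =
            if ((bestSeatInner seats (l + 1) : Nat) : Int) - (l : Int) - 1 > m then
              (((bestSeatInner seats (l + 1) : Nat) : Int) - (l : Int) - 1,
                PySem.Int.floordiv (((bestSeatInner seats (l + 1) : Nat) : Int) + (l : Int)) 2)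
            else (m, s) := rfl
        rw [hstep]
        split_ifs with hgt
        · exact ih _ (by omega) _ _
        · exact ih _ (by omega) _ _
      · rw [bestSeatOuter, dif_neg hl, pvBoundsFrom, dif_neg hl]
        rfl
  exact fun l m s => H (seats.length - l) l (le_refl _) m s

theorem alt_eq (seats : List Int) :
    bestSeat_alt seats =
      (List.foldl pvStep ((0 : Int), (-1 : Int))
        (pvPairsOf ((0 : Int) :: (pvNZ seats 0 ++ [(seats.length : Int)])))).2 := by
  unfold bestSeat_alt pvNZ
  simp only [zip_drop_eq_pairsOf, List.drop_zero, Nat.cast_zero]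
  rfl

-- ===== VERDICT (by name: the statement is the Claim_ definition above) =====
theorem bestSeat_spec : Claim_equal_bestSeat := by
  intro seats _
  unfold Spec_bestSeat
  rw [alt_eq]
  by_cases hpos : 0 < seats.length
  · rw [bestSeat, outer_eq_fold seats 0 0 (-1)]
    have hb := pvBounds_eq seats 0 hpos
    by_cases h0 : seats.getD 0 0 = 0
    · rw [pvNZ_step seats 0 hpos, if_neg (not_not_intro h0)]
      rw [show (0 : Nat) + 1 = 1 from rfl] at hb
      rw [hb]
      norm_num
    · rw [pvNZ_step seats 0 hpos, if_pos h0]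
      rw [show (0 : Nat) + 1 = 1 from rfl] at hb
      simp only [Nat.cast_zero, List.cons_append, hb, pvPairsOf, List.foldl_cons]
      have : pvStep ((0 : Int), (-1 : Int)) ((0 : Int), (0 : Int)) = ((0 : Int), (-1 : Int)) := by
        simp [pvStep]
      rw [this]
  · rw [bestSeat, bestSeatOuter, dif_neg hpos]
    rw [pvNZ_of_ge seats 0 (by omega)]
    have : seats.length = 0 := by omega
    simp [this, pvPairsOf, pvStep]
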